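-- pv_equiv track=rewrite | github.com/wangym2/CALM | utils/votingfunc.py | get_final_ans
-- ===== SOURCE A (Python) =====
-- def get_final_ans(vote_ans):
--     final_ans = {}
--     for key in vote_ans.keys():
--         if len(vote_ans[key]) == 0:
--             final_ans[key] = {"ans":None, "example":"A"}
--         else:
--             count = {}
--
--             for ans_pair in vote_ans[key]:
--                 # get the count the most frequent answer
--                 count[list(ans_pair.keys())[0]] = count.get(list(ans_pair.keys())[0], 0) + 1
--
--             final_ans[key] ={"ans":max(count, key=count.get)}
--             # extract one correct answer
--             # traverse from the last element in the list
--             for ans_pair in vote_ans[key][::-1]: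
--                 if list(ans_pair.keys())[0] == final_ans[key]["ans"]:
--                     final_ans[key]["example"] = ans_pair[list(ans_pair.keys())[0]]
--                     break
--     return final_ans
-- ===== SOURCE B (Python) =====
-- def _vote(pairs):
--     if not pairs:
--         return {"ans": None, "example": "A"}
--     count = {}
--     last_example = {}
--     for ans_pair in pairs:
--         k = next(iter(ans_pair))
--         count[k] = count.get(k, 0) + 1
--         last_example[k] = ans_pair[k]
--     winner = max(count, key=count.get)
--     return {"ans": winner, "example": last_example[winner]}
--
--
-- def get_final_ans(vote_ans):
--     return {key: _vote(pairs) for key, pairs in vote_ans.items()}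
-- ===== Notes on version B (the rewrite author's own statement) =====
-- stated objective: simpler
-- what changed: One fused forward pass per key maintains the count and the last example for each candidate answer (replacing A's separate count pass and reverse break-scan), and the result is built with a helper plus a dict comprehension.
import Mathlib
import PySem

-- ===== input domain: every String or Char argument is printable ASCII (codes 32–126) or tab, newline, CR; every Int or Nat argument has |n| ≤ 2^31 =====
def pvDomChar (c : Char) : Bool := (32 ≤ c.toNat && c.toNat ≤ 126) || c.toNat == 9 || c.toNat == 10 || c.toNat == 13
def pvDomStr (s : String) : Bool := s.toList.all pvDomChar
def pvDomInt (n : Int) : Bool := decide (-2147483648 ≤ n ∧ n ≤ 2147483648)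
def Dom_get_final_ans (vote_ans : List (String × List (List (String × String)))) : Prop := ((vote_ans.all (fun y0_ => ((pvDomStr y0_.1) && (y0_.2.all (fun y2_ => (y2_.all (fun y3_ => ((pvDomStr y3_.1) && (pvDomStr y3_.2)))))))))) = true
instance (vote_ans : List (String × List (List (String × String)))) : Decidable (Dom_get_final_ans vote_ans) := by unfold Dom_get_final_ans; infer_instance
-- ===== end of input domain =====

-- B fuses A's count pass and reverse example-scan into one forward pass keeping a count dict
-- and a last-example dict, and builds the result by mapping a per-key helper (simpler; return value only).

-- shared dict-access helpers (both Pythons write `list(ans_pair.keys())[0]` / `ans_pair[that key]`)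
def pvKey0 (ap : List (String × String)) : String :=
  ((PySem.Dict.ofList ap).keys).headD ""   -- list(ans_pair.keys())[0]; Pre_ guarantees ap ≠ []

def pvVal0 (ap : List (String × String)) : String :=
  (PySem.Dict.ofList ap).getD (pvKey0 ap) ""   -- ans_pair[list(ans_pair.keys())[0]]

-- ===== PORT A =====
def get_final_ans (vote_ans : List (String × List (List (String × String)))) : List (String × List (String × Option String)) :=
  let d := PySem.Dict.ofList vote_ans
  d.keys.foldl (fun final_ans key =>
    let lst := d.getD key []
    if lst.length = 0 then
      final_ans ++ [(key, [("ans", (none : Option String)), ("example", some "A")])]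
    else
      let count := lst.foldl
        (fun c ap => c.insert (pvKey0 ap) (c.getD (pvKey0 ap) 0 + 1))
        (PySem.Dict.empty : PySem.Dict String Int)
      let ans := (PySem.List.max? count.keys (fun k => count.getD k 0)).getD ""
      -- reverse traversal with break = find? on the reversed list
      match lst.reverse.find? (fun ap => pvKey0 ap == ans) with
      | some ap => final_ans ++ [(key, [("ans", some ans), ("example", some (pvVal0 ap))])]
      | none => final_ans ++ [(key, [("ans", some ans)])]) []

-- ===== PORT B =====
def pvVote (pairs : List (List (String × String))) : List (String × Option String) :=
  match pairs with
  | [] => [("ans", none), ("example", some "A")]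
  | _ :: _ =>
    let st := pairs.foldl
      (fun (st : PySem.Dict String Int × PySem.Dict String String) ap =>
        (st.1.modify (pvKey0 ap) 0 (· + 1), st.2.insert (pvKey0 ap) (pvVal0 ap)))
      (PySem.Dict.empty, PySem.Dict.empty)
    let winner := (PySem.List.max? st.1.keys (fun k => st.1.getD k 0)).getD ""
    [("ans", some winner), ("example", st.2.get? winner)]

def get_final_ans_alt (vote_ans : List (String × List (List (String × String)))) : List (String × List (String × Option String)) :=
  (PySem.Dict.ofList vote_ans).items.map (fun p => (p.1, pvVote p.2))

-- ===== PRECONDITION & SPEC =====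
-- Pre_ excludes inputs containing an empty ans_pair dict: there `list(ans_pair.keys())[0]` raises
-- IndexError in A (and B raises StopIteration), so A returns no value.
def Pre_get_final_ans (vote_ans : List (String × List (List (String × String)))) : Prop :=
  (vote_ans.all (fun p => p.2.all (fun ap => !ap.isEmpty))) = true
instance (vote_ans : List (String × List (List (String × String)))) : Decidable (Pre_get_final_ans vote_ans) := by unfold Pre_get_final_ans; infer_instance

def pvWitness_get_final_ans : (List (String × List (List (String × String)))) :=
  [("q", [[("a", "x")], [("b", "y")], [("a", "z")]]), ("r", [])]

def Spec_get_final_ans (vote_ans : List (String × List (List (String × String)))) (out : List (String × List (String × Option String))) : Prop := out = get_final_ans_alt vote_ans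
instance (vote_ans : List (String × List (List (String × String)))) (out : List (String × List (String × Option String))) : Decidable (Spec_get_final_ans vote_ans out) := by unfold Spec_get_final_ans; infer_instance

-- ===== CLAIM (what is proved, stated in full; the proofs are below) =====
def Claim_equal_get_final_ans : Prop := ∀ (vote_ans : List (String × List (List (String × String)))), Dom_get_final_ans vote_ans → Pre_get_final_ans vote_ans → Spec_get_final_ans vote_ans (get_final_ans vote_ans)

-- ===== LEMMAS AND PROOFS =====

-- A's per-key body, factored out for the proof
def pvEntryA (lst : List (List (String × String))) : List (String × Option String) :=
  if lst.length = 0 then [("ans", (none : Option String)), ("example", some "A")]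
  else
    let count := lst.foldl
      (fun c ap => c.insert (pvKey0 ap) (c.getD (pvKey0 ap) 0 + 1))
      (PySem.Dict.empty : PySem.Dict String Int)
    let ans := (PySem.List.max? count.keys (fun k => count.getD k 0)).getD ""
    match lst.reverse.find? (fun ap => pvKey0 ap == ans) with
    | some ap => [("ans", some ans), ("example", some (pvVal0 ap))]
    | none => [("ans", some ans)]

theorem pv_A_as_map (vote_ans : List (String × List (List (String × String)))) :
    get_final_ans vote_ans =
      (PySem.Dict.ofList vote_ans).keys.map
        (fun key => (key, pvEntryA ((PySem.Dict.ofList vote_ans).getD key []))) := by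
  simp only [get_final_ans]
  rw [← List.nil_append ((PySem.Dict.ofList vote_ans).keys.map
        (fun key => (key, pvEntryA ((PySem.Dict.ofList vote_ans).getD key [])))),
      ← PySem.List.foldl_append_singleton_eq_map]
  apply PySem.List.foldl_congr_mem
  intro acc key _
  simp only [pvEntryA]
  split
  · rfl
  · split <;> rfl

-- last_example lookup = value of the last occurrence (A's reverse scan)
theorem pv_lastex {α : Type} (k : α → String) (v : α → String)
    (lst : List α) (d : PySem.Dict String String) (w : String) :
    (lst.foldl (fun d ap => d.insert (k ap) (v ap)) d).get? w =
      (match lst.reverse.find? (fun ap => k ap == w) with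
        | some ap => some (v ap)
        | none => d.get? w) := by
  induction lst generalizing d with
  | nil => simp
  | cons a t ih =>
    simp only [List.foldl_cons, List.reverse_cons, List.find?_append, ih]
    cases h : t.reverse.find? (fun ap => k ap == w) with
    | some ap => simp [Option.or]
    | none =>
      simp only [Option.none_or, List.find?_singleton]
      rw [PySem.Dict.get?_insert]
      by_cases hw : k a == w
      · simp [hw]
        simp at hw
        simp [hw]
      · simp [hw]
        simp at hw
        simp [Ne.symm hw]

theorem pv_entry_eq (lst : List (List (String × String))) : pvEntryA lst = pvVote lst := by
  cases lst with
  | nil => rfl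
  | cons a t =>
    have hsplit := PySem.List.foldl_prod_mk
      (fun (c : PySem.Dict String Int) (ap : List (String × String)) => c.modify (pvKey0 ap) 0 (· + 1))
      (fun (d : PySem.Dict String String) (ap : List (String × String)) => d.insert (pvKey0 ap) (pvVal0 ap))
      (a :: t) PySem.Dict.empty PySem.Dict.empty
    -- both count loops build the same Counter over the first keys
    have hc : (a :: t).foldl
        (fun c ap => c.insert (pvKey0 ap) (c.getD (pvKey0 ap) 0 + 1))
        (PySem.Dict.empty : PySem.Dict String Int) =
        PySem.Dict.counter ((a :: t).map pvKey0) := by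
      rw [← PySem.Dict.foldl_insert_getD_add_one_eq_counter, List.foldl_map]
    have hm : (a :: t).foldl
        (fun c ap => c.modify (pvKey0 ap) 0 (· + 1))
        (PySem.Dict.empty : PySem.Dict String Int) =
        PySem.Dict.counter ((a :: t).map pvKey0) := by
      rw [PySem.Dict.counter_eq_foldl, List.foldl_map]
    simp only [pvEntryA, pvVote, List.length_cons, hsplit, hc, hm]
    rw [if_neg (by simp : ¬ (t.length + 1 = 0))]
    set cnt := PySem.Dict.counter ((a :: t).map pvKey0) with hcnt
    set w := (PySem.List.max? cnt.keys (fun k => cnt.getD k 0)).getD "" with hwdef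
    -- the winner occurs among the first keys, so the reverse scan finds a match
    have hkeys : cnt.keys = PySem.Set.ofList ((a :: t).map pvKey0) := PySem.Dict.keys_counter _
    have hne : cnt.keys ≠ [] := by
      rw [hkeys]
      intro h
      have := (PySem.Set.mem_ofList ((a :: t).map pvKey0) (pvKey0 a)).2 (by simp)
      rw [h] at this
      simp at this
    obtain ⟨m, hm'⟩ : ∃ m, PySem.List.max? cnt.keys (fun k => cnt.getD k 0) = some m := by
      cases h : PySem.List.max? cnt.keys (fun k => cnt.getD k 0) with
      | none => exact absurd ((PySem.List.max?_eq_none_iff _ _).1 h) hne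
      | some m => exact ⟨m, rfl⟩
    have hmem : w ∈ (a :: t).map pvKey0 := by
      have hwm : w = m := by rw [hwdef, hm']; rfl
      rw [hwm]
      have := PySem.List.max?_mem hm'
      rw [hkeys] at this
      exact (PySem.Set.mem_ofList _ _).1 this
    have hfind : ∃ ap, (a :: t).reverse.find? (fun ap => pvKey0 ap == w) = some ap := by
      rcases List.mem_map.1 hmem with ⟨ap, hap, hk⟩
      have hex : ∃ x ∈ (a :: t).reverse, (fun ap => pvKey0 ap == w) x :=
        ⟨ap, List.mem_reverse.2 hap, by simp [hk]⟩
      rcases Option.isSome_iff_exists.1 (List.find?_isSome.2 hex) with ⟨ap', h'⟩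
      exact ⟨ap', h'⟩
    rcases hfind with ⟨ap, hap⟩
    have hget := pv_lastex pvKey0 pvVal0 (a :: t) PySem.Dict.empty w
    rw [hap] at hget
    simp only [hap, hget]

-- ===== VERDICT (by name: the statement is the Claim_ definition above) =====
theorem get_final_ans_spec : Claim_equal_get_final_ans := by
  intro vote_ans _ _
  unfold Spec_get_final_ans get_final_ans_alt
  rw [pv_A_as_map,
    PySem.Dict.items_eq_map_keys (PySem.Dict.ofList vote_ans)
      (PySem.Dict.nodup_keys_ofList vote_ans) [], List.map_map]
  exact List.map_congr_left (fun k _ => by simp [Function.comp, pv_entry_eq])
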